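-- pv_equiv track=rewrite | github.com/lrxjason/American_football_field_tracking | field_tracking_function.py | check_tracked
-- ===== SOURCE A (Python) =====
-- def check_tracked(tracked_list):
--     """
--     :param tracked_list: all intersection are visible on frame
--     :return: number of features on each hash lines
--     """
--     top_hash_number_tracking = 0
--     bottom_hash_number_tracking = 0
--     for i in range(len(tracked_list)):
--         if tracked_list[i] == 1:
--             # if even
--             if i % 2 == 0:
--                 top_hash_number_tracking += 1
--             # if odd
--             else:
--                 bottom_hash_number_tracking += 1
--     return top_hash_number_tracking, bottom_hash_number_tracking
-- ===== SOURCE B (Python) =====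
-- def check_tracked(tracked_list):
--     """
--     :param tracked_list: all intersection are visible on frame
--     :return: number of features on each hash lines
--     """
--     top = tracked_list[::2].count(1)
--     bottom = tracked_list[1::2].count(1)
--     return top, bottom
-- ===== Notes on version B (the rewrite author's own statement) =====
-- stated objective: simpler
-- what changed: Replaces the indexed loop with its i%2 parity branch by two stride slices ([::2] and [1::2]) counted directly with list.count(1).
import Mathlib
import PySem

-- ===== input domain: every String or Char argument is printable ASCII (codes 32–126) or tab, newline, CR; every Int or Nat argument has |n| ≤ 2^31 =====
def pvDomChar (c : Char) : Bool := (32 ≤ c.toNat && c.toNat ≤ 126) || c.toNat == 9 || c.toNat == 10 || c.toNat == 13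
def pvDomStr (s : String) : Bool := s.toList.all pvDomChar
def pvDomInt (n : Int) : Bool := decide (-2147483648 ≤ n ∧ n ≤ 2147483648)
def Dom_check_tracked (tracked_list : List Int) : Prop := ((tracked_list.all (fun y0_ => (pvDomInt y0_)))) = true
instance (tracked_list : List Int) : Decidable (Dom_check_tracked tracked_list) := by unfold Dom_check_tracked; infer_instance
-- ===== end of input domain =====

-- B replaces A's indexed loop with an i%2 parity branch by counting 1s in the two stride slices xs[::2] and xs[1::2] (simpler).


-- ===== PORT A =====
def check_tracked (tracked_list : List Int) : Int × Int :=
  (PySem.List.pyRange 0 (PySem.List.len tracked_list) 1).foldl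
    (fun acc i =>
      if PySem.List.pyGetD tracked_list i 0 == 1 then
        if PySem.Int.mod i 2 == 0 then (acc.1 + 1, acc.2) else (acc.1, acc.2 + 1)
      else acc)
    (0, 0)

-- ===== PORT B =====
-- hand port of the stride-2 slice xs[::2] (PySem.List.slice has no step argument); exact: every second element starting at index 0
def sliceStep2 (xs : List Int) : List Int :=
  match xs with
  | [] => []
  | [x] => [x]
  | x :: _ :: rest => x :: sliceStep2 rest

def check_tracked_alt (tracked_list : List Int) : Int × Int :=
  ((PySem.List.count (sliceStep2 tracked_list) 1 : Nat),
   (PySem.List.count (sliceStep2 (tracked_list.drop 1)) 1 : Nat))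

-- ===== PRECONDITION & SPEC =====
def Spec_check_tracked (tracked_list : List Int) (out : Int × Int) : Prop := out = check_tracked_alt tracked_list
instance (tracked_list : List Int) (out : Int × Int) : Decidable (Spec_check_tracked tracked_list out) := by unfold Spec_check_tracked; infer_instance

-- ===== CLAIM (what is proved, stated in full; the proofs are below) =====
def Claim_equal_check_tracked : Prop := ∀ (tracked_list : List Int), Dom_check_tracked tracked_list → Spec_check_tracked tracked_list (check_tracked tracked_list)

-- ===== LEMMAS AND PROOFS =====

-- the loop body of A, over (index, element) pairs
def pvBody (acc : Int × Int) (p : Int × Int) : Int × Int :=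
  if p.2 == 1 then
    if PySem.Int.mod p.1 2 == 0 then (acc.1 + 1, acc.2) else (acc.1, acc.2 + 1)
  else acc

lemma sliceStep2_cons (y : Int) (rest : List Int) :
    sliceStep2 (y :: rest) = y :: sliceStep2 (rest.drop 1) := by
  cases rest <;> simp [sliceStep2]

lemma pvLoop (xs : List Int) (s : Int) (acc : Int × Int) (hs : s % 2 = 0) :
    (PySem.List.enumerate xs s).foldl pvBody acc
      = (acc.1 + (PySem.List.count (sliceStep2 xs) 1 : Nat),
         acc.2 + (PySem.List.count (sliceStep2 (xs.drop 1)) 1 : Nat)) := by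
  induction xs using sliceStep2.induct generalizing s acc with
  | case1 => simp [PySem.List.enumerate, PySem.List.count, sliceStep2]
  | case2 x =>
      simp only [PySem.List.enumerate_cons, PySem.List.enumerate_nil, List.foldl_cons,
        List.foldl_nil, sliceStep2, List.drop_succ_cons, List.drop_nil, pvBody,
        PySem.Int.mod_eq_emod_of_pos (by omega : (0:Int) < 2), hs]
      by_cases hx : x = 1 <;> simp [hx, PySem.List.count]
  | case3 x y rest ih =>
      have h1 : (s + 1) % 2 = 1 := by omega
      have h2 : (s + 2) % 2 = 0 := by omega
      simp only [PySem.List.enumerate_cons, List.foldl_cons, pvBody,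
        PySem.Int.mod_eq_emod_of_pos (by omega : (0:Int) < 2), hs, h1]
      rw [ih (s + 1 + 1) _ (by omega)]
      by_cases hx : x = 1 <;> by_cases hy : y = 1 <;>
        simp [hx, hy, sliceStep2, sliceStep2_cons, PySem.List.count] <;> push_cast <;> first | omega | (ring_nf; omega)

-- ===== VERDICT (by name: the statement is the Claim_ definition above) =====
theorem check_tracked_spec : Claim_equal_check_tracked := by
  intro xs _
  show check_tracked xs = check_tracked_alt xs
  have h := pvLoop xs 0 (0, 0) (by decide)
  rw [PySem.List.enumerate_eq_map_pyRange xs 0, List.foldl_map] at h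
  simpa [check_tracked, check_tracked_alt, pvBody] using h
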